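-- pv_equiv track=rewrite | github.com/Dhrubub/Smart-Vision-Hat | app_pi/test3.py | combine_items
-- ===== SOURCE A (Python) =====
-- from collections import Counter
--
-- def combine_items(items):
--     # Count the occurrences of each item
--     item_counts = Counter(items)
--
--     # Initialize an empty list to store the formatted strings
--     formatted_items = []
--
--     # Iterate through the item counts and create the formatted strings
--     for item, count in item_counts.items():
--         if count == 1:
--             formatted_items.append(f'1 {item}')
--         else:
--             formatted_items.append(f'{count} {item}s')
--
--     return formatted_items
-- ===== SOURCE B (Python) =====
-- def combine_items(items):
--     items = list(items)
--     if not items: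
--         return []
--     head = items[0]
--     remaining = [x for x in items if x != head]
--     count = len(items) - len(remaining)
--     first = f'1 {head}' if count == 1 else f'{count} {head}s'
--     return [first] + combine_items(remaining)
-- ===== Notes on version B (the rewrite author's own statement) =====
-- stated objective: alternative
-- what changed: B replaces A's single-pass Counter tally with a recursive partition: it strips every copy of the first item from the list, derives its count from the length difference, emits that line, and recurses on the remainder.
import Mathlib
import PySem

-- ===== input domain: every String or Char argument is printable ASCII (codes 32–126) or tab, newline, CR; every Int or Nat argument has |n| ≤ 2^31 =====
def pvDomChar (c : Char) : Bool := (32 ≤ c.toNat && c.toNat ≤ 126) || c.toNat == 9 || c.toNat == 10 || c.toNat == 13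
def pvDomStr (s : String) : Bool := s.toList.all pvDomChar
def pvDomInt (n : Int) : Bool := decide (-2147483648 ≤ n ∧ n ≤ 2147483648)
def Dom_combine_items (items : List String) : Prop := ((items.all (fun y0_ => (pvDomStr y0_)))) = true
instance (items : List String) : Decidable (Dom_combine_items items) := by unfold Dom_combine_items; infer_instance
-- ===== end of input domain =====

-- B replaces A's Counter tally with a recursive partition (strip all copies of the first item, emit its line from the length difference, recurse); an alternative decomposition, not faster.
-- ===== PORT A =====
def combine_items (items : List String) : List String :=
  let item_counts := PySem.Dict.counter items
  item_counts.items.foldl (fun formatted_items p =>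
    if p.2 == 1 then formatted_items ++ ["1 " ++ p.1]
    else formatted_items ++ [PySem.Int.toStr p.2 ++ " " ++ p.1 ++ "s"]) []

-- ===== PORT B =====
def combine_items_alt (items : List String) : List String :=
  match items with
  | [] => []
  | head :: rest =>
    let remaining := (head :: rest).filter (fun x => !(x == head))
    let count : Int := ((head :: rest).length : Int) - (remaining.length : Int)
    (if count == 1 then "1 " ++ head
     else PySem.Int.toStr count ++ " " ++ head ++ "s") :: combine_items_alt remaining
termination_by items.length
decreasing_by
  simp only [List.filter_cons, beq_self_eq_true, Bool.not_true, List.length_cons]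
  exact Nat.lt_succ_of_le (List.length_filter_le _ _)

-- ===== PRECONDITION & SPEC =====
def Spec_combine_items (items : List String) (out : List String) : Prop := out = combine_items_alt items
instance (items : List String) (out : List String) : Decidable (Spec_combine_items items out) := by unfold Spec_combine_items; infer_instance

-- ===== CLAIM =====
def Claim_equal_combine_items : Prop := ∀ (items : List String), Dom_combine_items items → Spec_combine_items items (combine_items items)

-- ===== LEMMAS AND PROOFS =====
-- the common shape both ports reduce to: one formatted line per key
def pvFmt (c : Int) (k : String) : String :=
  if c == 1 then "1 " ++ k else PySem.Int.toStr c ++ " " ++ k ++ "s"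

lemma pvAdd_eq (s : List String) (x : String) :
    PySem.Set.add s x = if x ∈ s then s else s ++ [x] := by
  by_cases h : x ∈ s
  · simp [PySem.Set.add, h]
  · simp [PySem.Set.add, h]

-- skipping duplicates of an element already in the accumulator does not change the fold
lemma pvFoldlAdd_filter (t : List String) : ∀ (s : List String) (h : String), h ∈ s →
    List.foldl PySem.Set.add s t = List.foldl PySem.Set.add s (t.filter (fun y => !(y == h))) := by
  induction t with
  | nil => intro s h _; rfl
  | cons x t ih =>
    intro s h hs
    by_cases hx : x = h
    · subst hx
      have hdrop : (x :: t).filter (fun y => !(y == x)) = t.filter (fun y => !(y == x)) := by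
        simp
      rw [hdrop, List.foldl_cons, pvAdd_eq, if_pos hs]
      exact ih s x hs
    · have hxb : (x == h) = false := by simp [hx]
      have hkeep : (x :: t).filter (fun y => !(y == h)) = x :: t.filter (fun y => !(y == h)) := by
        simp [hxb]
      rw [hkeep, List.foldl_cons, List.foldl_cons]
      apply ih _ h
      rw [pvAdd_eq]
      split
      · exact hs
      · exact List.mem_append_left _ hs

-- an accumulator head never matched again stays in front
lemma pvFoldlAdd_cons (t : List String) : ∀ (s : List String) (h : String),
    (∀ y ∈ t, (y == h) = false) →
    List.foldl PySem.Set.add (h :: s) t = h :: List.foldl PySem.Set.add s t := by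
  induction t with
  | nil => intro s h _; rfl
  | cons x t ih =>
    intro s h hne
    have hxh : (x == h) = false := hne x (by simp)
    have hx : x ≠ h := fun he => by simp [he] at hxh
    have step : PySem.Set.add (h :: s) x = h :: PySem.Set.add s x := by
      by_cases hmem : x ∈ s
      · rw [pvAdd_eq, pvAdd_eq, if_pos hmem, if_pos (by simp [hmem])]
      · rw [pvAdd_eq, pvAdd_eq, if_neg hmem, if_neg (by simp [hmem, hx])]
        rfl
    rw [List.foldl_cons, List.foldl_cons, step]
    exact ih (PySem.Set.add s x) h (fun y hy => hne y (List.mem_cons_of_mem _ hy))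

-- first-occurrence dedup unfolds one group at a time
lemma pvOfList_cons (h : String) (t : List String) :
    PySem.Set.ofList (h :: t) = h :: PySem.Set.ofList (t.filter (fun y => !(y == h))) := by
  show List.foldl PySem.Set.add (PySem.Set.add PySem.Set.empty h) t = _
  have hempty : PySem.Set.add (PySem.Set.empty : PySem.Set String) h = [h] := by
    simp [PySem.Set.add, PySem.Set.empty]
  rw [hempty, pvFoldlAdd_filter t [h] h (by simp),
      pvFoldlAdd_cons _ [] h (by intro y hy
                                 have := (List.mem_filter.mp hy).2
                                 simpa using this)]
  rfl

-- length difference after stripping an element is its multiplicity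
lemma pvLenFilter (h : String) (t : List String) :
    (t.filter (fun y => !(y == h))).length + List.count h t = t.length := by
  induction t with
  | nil => rfl
  | cons x t ih =>
    by_cases hx : x = h
    · subst hx; simp; omega
    · simp [hx]; omega

-- B computes the same per-key map as A's Counter, proved by strong induction on length
lemma pvGoEq (n : Nat) : ∀ t : List String, t.length ≤ n →
    combine_items_alt t = (PySem.Set.ofList t).map (fun k => pvFmt ((List.count k t : Int)) k) := by
  induction n with
  | zero =>
    intro t ht
    have : t = [] := List.eq_nil_of_length_eq_zero (Nat.le_zero.mp ht)
    subst this
    simp [combine_items_alt, PySem.Set.ofList, PySem.Set.empty]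
  | succ n ih =>
    intro t ht
    match t with
    | [] => simp [combine_items_alt, PySem.Set.ofList, PySem.Set.empty]
    | h :: t =>
      have hfc : (h :: t).filter (fun y => !(y == h)) = t.filter (fun y => !(y == h)) := by
        simp
      have hlen : (t.filter (fun y => !(y == h))).length ≤ n := by
        have := List.length_filter_le (fun y => !(y == h)) t
        simp only [List.length_cons] at ht; omega
      have hcount : ((h :: t).length : Int) - (((h :: t).filter (fun y => !(y == h))).length : Int)
          = (List.count h (h :: t) : Int) := by
        rw [hfc]
        have h1 := pvLenFilter h t
        have h2 : List.count h (h :: t) = List.count h t + 1 := by simp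
        rw [h2]
        simp only [List.length_cons]
        push_cast
        omega
      simp only [combine_items_alt]
      rw [pvOfList_cons, List.map_cons, hcount, hfc, ih _ hlen]
      congr 1
      apply List.map_congr_left
      intro k hk
      have hk' : k ∈ t.filter (fun y => !(y == h)) := (PySem.Set.mem_ofList _ _).mp hk
      have hkb : (k == h) = false := by
        have := (List.mem_filter.mp hk').2
        simpa using this
      have hkne : k ≠ h := fun he => by simp [he] at hkb
      have hcnt : List.count k (t.filter (fun y => !(y == h))) = List.count k (h :: t) := by
        rw [List.count_filter (by simp [hkb])]
        simp [Ne.symm hkne]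
      rw [hcnt]

-- A's fold appends one line per pair: it is a map
lemma pvFoldA_gen (l : List (String × Int)) : ∀ acc : List String,
    l.foldl (fun formatted_items p =>
      if p.2 == 1 then formatted_items ++ ["1 " ++ p.1]
      else formatted_items ++ [PySem.Int.toStr p.2 ++ " " ++ p.1 ++ "s"]) acc
    = acc ++ l.map (fun p => pvFmt p.2 p.1) := by
  induction l with
  | nil => intro acc; simp
  | cons p l ih =>
    intro acc
    rw [List.foldl_cons, List.map_cons, ih]
    unfold pvFmt
    split <;> simp

-- A reduces to the same per-key map
lemma pvAEq (items : List String) :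
    combine_items items = (PySem.Set.ofList items).map (fun k => pvFmt ((List.count k items : Int)) k) := by
  simp only [combine_items]
  rw [pvFoldA_gen, PySem.Dict.items_counter, List.map_map]
  rfl

-- ===== VERDICT =====
theorem combine_items_spec : Claim_equal_combine_items := by
  intro items _
  unfold Spec_combine_items
  rw [pvAEq, pvGoEq items.length items (le_refl _)]
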